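-- pv_equiv track=rewrite | github.com/hoanbka/advanced-algorithms | scariestMask.py | scariestMask
-- ===== SOURCE A (Python) =====
-- def scariestMask(mask):
--     count = 0
--     for i in range(len(mask)):
--         low = 0
--         high = len(mask[i]) - 1
--
--         while low < high:
--             if mask[i][low] != mask[i][high]:
--                 count += 1
--             low += 1
--             high -= 1
--             pass
--     return count
-- ===== SOURCE B (Python) =====
-- def scariestMask(mask):
--     count = 0
--     for row in mask:
--         stack = []
--         half, odd = divmod(len(row), 2)
--         for j, ch in enumerate(row):
--             if j < half:
--                 stack.append(ch)
--             elif j >= half + odd: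
--                 if stack.pop() != ch:
--                     count += 1
--     return count
-- ===== Notes on version B (the rewrite author's own statement) =====
-- stated objective: alternative
-- what changed: Replaces A's two-pointer walk from both ends of each row by a single left-to-right scan that pushes the first half onto an explicit stack and, past the middle, pops the stack to compare each second-half character with its mirror.
import Mathlib
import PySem

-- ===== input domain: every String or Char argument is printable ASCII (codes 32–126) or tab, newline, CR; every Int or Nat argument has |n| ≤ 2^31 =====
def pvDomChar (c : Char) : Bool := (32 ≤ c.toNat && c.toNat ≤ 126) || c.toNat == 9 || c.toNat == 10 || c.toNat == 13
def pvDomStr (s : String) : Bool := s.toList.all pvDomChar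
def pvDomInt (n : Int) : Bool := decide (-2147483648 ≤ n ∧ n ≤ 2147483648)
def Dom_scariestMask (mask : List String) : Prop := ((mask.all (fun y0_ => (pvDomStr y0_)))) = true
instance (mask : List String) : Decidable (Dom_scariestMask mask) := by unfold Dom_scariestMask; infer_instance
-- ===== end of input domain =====

-- B replaces A's two-pointer walk from both ends of each row by one left-to-right scan that
-- pushes the first half on an explicit stack and pops it against the second half; objective: alternative.

-- ===== PORT A =====
-- the inner 'while low < high' loop of A; indices are always in range when accessed
def pvLoopA (s : List Char) (low high count : Int) : Int :=
  if low < high then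
    pvLoopA s (low + 1) (high - 1)
      (if (PySem.List.pyGet? s low).getD ' ' ≠ (PySem.List.pyGet? s high).getD ' ' then count + 1 else count)
  else count
termination_by (high - low).toNat
decreasing_by omega

def scariestMask (mask : List String) : Int :=
  mask.foldl (fun count s => pvLoopA s.toList 0 ((s.toList.length : Int) - 1) count) 0

-- ===== PORT B =====
-- one iteration of B's inner 'for j, ch in enumerate(row)' loop; state = (stack, count)
def pvStepB (half odd : Int) (st : List Char × Int) (p : Int × Char) : List Char × Int :=
  if p.1 < half then (st.1 ++ [p.2], st.2)
  else if half + odd ≤ p.1 then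
    -- stack.pop(): the stack is never empty here (the popped-over second half is exactly as
    -- long as the pushed first half), so the ' ' default of getD is never used
    (st.1.dropLast, if (st.1.getLast?.getD ' ') ≠ p.2 then st.2 + 1 else st.2)
  else st

def scariestMask_alt (mask : List String) : Int :=
  mask.foldl (fun count s =>
    ((PySem.List.enumerate s.toList 0).foldl
      (pvStepB (PySem.Int.floordiv (s.toList.length : Int) 2)
               (PySem.Int.mod (s.toList.length : Int) 2)) ([], count)).2) 0

-- ===== PRECONDITION & SPEC =====
def Spec_scariestMask (mask : List String) (out : Int) : Prop := out = scariestMask_alt mask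
instance (mask : List String) (out : Int) : Decidable (Spec_scariestMask mask out) := by unfold Spec_scariestMask; infer_instance

-- ===== CLAIM (what is proved, stated in full; the proofs are below) =====
def Claim_equal_scariestMask : Prop := ∀ (mask : List String), Dom_scariestMask mask → Spec_scariestMask mask (scariestMask mask)

-- ===== LEMMAS AND PROOFS =====

-- the common per-row value: mismatches between the reversed first half and the second half
def pvPairCnt (l : List Char) : Int :=
  (((l.take (l.length / 2)).reverse.zip (l.drop (l.length / 2 + l.length % 2))).countP
      (fun p => p.1 != p.2) : Int)

-- the accumulator of A's inner loop is additive
theorem pvLoopA_acc (s : List Char) (low high c : Int) :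
    pvLoopA s low high c = c + pvLoopA s low high 0 := by
  have H : ∀ (n : Nat) (low high : Int), (high - low).toNat = n →
      ∀ c : Int, pvLoopA s low high c = c + pvLoopA s low high 0 := by
    intro n
    induction n using Nat.strong_induction_on with
    | _ n ih =>
      intro low high hn c
      conv_lhs => rw [pvLoopA]
      conv_rhs => rw [pvLoopA]
      by_cases h : low < high
      · simp only [if_pos h]
        split_ifs with hp
        · rw [ih ((high - 1) - (low + 1)).toNat (by omega) (low + 1) (high - 1) rfl (c + 1),
              ih ((high - 1) - (low + 1)).toNat (by omega) (low + 1) (high - 1) rfl (0 + 1)]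
          ring
        · rw [ih ((high - 1) - (low + 1)).toNat (by omega) (low + 1) (high - 1) rfl c]
      · simp only [if_neg h]
        ring
  exact H _ low high rfl c

theorem pyGet_cons_succ_int (x : Char) (xs : List Char) (i : Int) (h : 0 ≤ i) :
    PySem.List.pyGet? (x :: xs) (i + 1) = PySem.List.pyGet? xs i := by
  have hi : i = ((i.toNat : Nat) : Int) := by omega
  rw [hi, PySem.List.pyGet?_cons_succ]

theorem pyGet_mid (l : List Char) (b : Char) (i : Int) (h0 : 0 ≤ i) (h1 : i < l.length) :
    PySem.List.pyGet? (l ++ [b]) i = PySem.List.pyGet? l i := by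
  rw [PySem.List.pyGet?_of_nonneg (l ++ [b]) h0, PySem.List.pyGet?_of_nonneg l h0,
      List.getElem?_append_left (by omega)]

-- the window [low+1, high+1] of a :: (l ++ [b]) is the window [low, high] of l
theorem pvLoopA_shift (l : List Char) (a b : Char) (low high c : Int)
    (hl : 0 ≤ low) (hh : high < l.length) :
    pvLoopA (a :: (l ++ [b])) (low + 1) (high + 1) c = pvLoopA l low high c := by
  have H : ∀ (n : Nat) (low high : Int), (high - low).toNat = n → 0 ≤ low → high < l.length →
      ∀ c : Int, pvLoopA (a :: (l ++ [b])) (low + 1) (high + 1) c = pvLoopA l low high c := by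
    intro n
    induction n using Nat.strong_induction_on with
    | _ n ih =>
      intro low high hn hl hh c
      conv_lhs => rw [pvLoopA]
      conv_rhs => rw [pvLoopA]
      by_cases h : low < high
      · rw [if_pos (by omega : low + 1 < high + 1), if_pos h]
        have hget1 : PySem.List.pyGet? (a :: (l ++ [b])) (low + 1) = PySem.List.pyGet? l low := by
          rw [pyGet_cons_succ_int _ _ _ hl, pyGet_mid _ _ _ hl (by omega)]
        have hget2 : PySem.List.pyGet? (a :: (l ++ [b])) (high + 1) = PySem.List.pyGet? l high := by
          have h0h : (0:Int) ≤ high := by omega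
          rw [pyGet_cons_succ_int _ _ _ h0h, pyGet_mid _ _ _ h0h hh]
        rw [hget1, hget2]
        have e1 : high + 1 - 1 = (high - 1) + 1 := by ring
        rw [e1]
        exact ih ((high - 1) - (low + 1)).toNat (by omega) (low + 1) (high - 1) rfl
          (by omega) (by omega) _
      · rw [if_neg (by omega : ¬ (low + 1 < high + 1)), if_neg h]
  exact H _ low high rfl hl hh c

-- peeling the outer characters of a row adds their mismatch to the pair count
theorem pvPairCnt_cons_append (a b : Char) (l : List Char) :
    pvPairCnt (a :: (l ++ [b])) = pvPairCnt l + (if a ≠ b then 1 else 0) := by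
  unfold pvPairCnt
  have h2 : (a :: (l ++ [b])).length = l.length + 2 := by simp
  rw [h2]
  have hh : (l.length + 2) / 2 = l.length / 2 + 1 := by omega
  have hoo : (l.length + 2) % 2 = l.length % 2 := by omega
  rw [hh, hoo]
  have hhle : l.length / 2 ≤ l.length := by omega
  have hhole : l.length / 2 + l.length % 2 ≤ l.length := by omega
  have htake : (a :: (l ++ [b])).take (l.length / 2 + 1) = a :: l.take (l.length / 2) := by
    rw [List.take_succ_cons, List.take_append_of_le_length hhle]
  have hdrop : (a :: (l ++ [b])).drop (l.length / 2 + 1 + l.length % 2) =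
      l.drop (l.length / 2 + l.length % 2) ++ [b] := by
    rw [show l.length / 2 + 1 + l.length % 2 = (l.length / 2 + l.length % 2) + 1 by omega,
        List.drop_succ_cons, List.drop_append_of_le_length hhole]
  rw [htake, hdrop, List.reverse_cons,
      List.zip_append (by simp; omega)]
  rw [List.countP_append]
  by_cases hab : a = b
  · simp [hab]
  · simp [hab]

-- A's per-row two-pointer count equals the common per-row pair count
theorem pvRowA (l : List Char) :
    pvLoopA l 0 ((l.length : Int) - 1) 0 = pvPairCnt l := by
  induction l using List.bidirectionalRec with
  | nil => rw [pvLoopA]; simp [pvPairCnt]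
  | singleton a => rw [pvLoopA]; simp [pvPairCnt]
  | cons_append a l b ih =>
      have hlen : (((a :: (l ++ [b])).length : Int) - 1) = (l.length : Int) + 1 := by
        simp [List.length_cons, List.length_append]
      rw [hlen]
      conv_lhs => rw [pvLoopA]
      rw [if_pos (by positivity : (0 : Int) < (l.length : Int) + 1)]
      have hg1 : (PySem.List.pyGet? (a :: (l ++ [b])) 0).getD ' ' = a := by
        simp [PySem.List.pyGet?_zero_cons]
      have hg2 : (PySem.List.pyGet? (a :: (l ++ [b])) ((l.length : Int) + 1)).getD ' ' = b := by
        rw [pyGet_cons_succ_int _ _ _ (by positivity), PySem.List.pyGet?_append_length]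
        rfl
      rw [hg1, hg2]
      have e2 : (l.length : Int) + 1 - 1 = ((l.length : Int) - 1) + 1 := by ring
      rw [e2,
          pvLoopA_shift l a b 0 ((l.length : Int) - 1) _ (le_refl 0) (by omega),
          pvLoopA_acc, ih, pvPairCnt_cons_append]
      by_cases hab : a = b
      · simp [hab]
      · simp [hab]
        ring

-- push phase: all indices below half, the characters are appended to the stack
theorem pvPhase1 (h o : Int) (cs : List Char) : ∀ (s : Int) (st : List Char) (c : Int),
    s + cs.length ≤ h →
    (PySem.List.enumerate cs s).foldl (pvStepB h o) (st, c) = (st ++ cs, c) := by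
  induction cs with
  | nil => intro s st c _; simp [PySem.List.enumerate_nil]
  | cons x cs ih =>
      intro s st c hle
      rw [PySem.List.enumerate_cons, List.foldl_cons]
      simp only [List.length_cons] at hle
      have hs : s < h := by
        have : (0:Int) ≤ (cs.length : Int) := by positivity
        push_cast at hle; omega
      show (PySem.List.enumerate cs (s+1)).foldl (pvStepB h o) (pvStepB h o (st, c) (s, x)) = _
      rw [show pvStepB h o (st, c) (s, x) = (st ++ [x], c) by simp [pvStepB, hs]]
      rw [ih (s+1) (st ++ [x]) c (by push_cast at hle ⊢; omega)]
      simp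

-- pop phase: all indices at least half + odd; the tail st1 of the stack is popped
-- back-to-front against the scanned characters
theorem pvPhase3 (h o : Int) (ho : 0 ≤ o) (cs : List Char) : ∀ (st1 : List Char) (s : Int) (st0 : List Char) (c : Int),
    st1.length = cs.length → h + o ≤ s →
    (PySem.List.enumerate cs s).foldl (pvStepB h o) (st0 ++ st1, c) =
      (st0, c + ((st1.reverse.zip cs).countP (fun p => p.1 != p.2) : Int)) := by
  induction cs with
  | nil =>
      intro st1 s st0 c hlen _
      rw [List.length_eq_zero_iff.mp hlen]
      simp [PySem.List.enumerate_nil]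
  | cons x cs ih =>
      intro st1 s st0 c hlen hs
      obtain ⟨st1', y, rfl⟩ : ∃ st1' y, st1 = st1' ++ [y] := by
        rcases List.eq_nil_or_concat st1 with h' | ⟨st1', y, h'⟩
        · simp [h'] at hlen
        · exact ⟨st1', y, by simpa using h'⟩
      rw [PySem.List.enumerate_cons, List.foldl_cons]
      have hstep : pvStepB h o (st0 ++ (st1' ++ [y]), c) (s, x) =
          (st0 ++ st1', if y ≠ x then c + 1 else c) := by
        have h1 : ¬ (s < h) := by omega
        have h2 : h + o ≤ s := hs
        simp [pvStepB, h1, h2, ← List.append_assoc]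
      rw [hstep,
          ih st1' (s+1) st0 _ (by simpa using hlen) (by omega)]
      have : ((st1' ++ [y]).reverse.zip (x :: cs)).countP (fun p => p.1 != p.2) =
          (if (y != x) = true then 1 else 0) + (st1'.reverse.zip cs).countP (fun p => p.1 != p.2) := by
        rw [List.reverse_append]
        simp [List.countP_cons]
        omega
      rw [this]
      by_cases hyx : y = x
      · simp [hyx]
      · simp [hyx]
        ring

-- B's scan over a row split as first half ++ middle ++ second half
theorem pvRowB_core (h o : Nat) (t mid u : List Char) (ht : t.length = h)
    (hmid : mid.length = o) (hu : u.length = h) (ho : o ≤ 1) (c : Int) :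
    ((PySem.List.enumerate (t ++ (mid ++ u)) 0).foldl (pvStepB (h : Int) (o : Int)) ([], c)).2
      = c + ((t.reverse.zip u).countP (fun p => p.1 != p.2) : Int) := by
  rw [PySem.List.enumerate_append, List.foldl_append,
      pvPhase1 (h : Int) (o : Int) t 0 [] c (by rw [ht]; omega),
      PySem.List.enumerate_append, List.foldl_append]
  have hmidfold : (PySem.List.enumerate mid (0 + (t.length : Int))).foldl
      (pvStepB (h : Int) (o : Int)) ([] ++ t, c) = ([] ++ t, c) := by
    cases mid with
    | nil => rw [PySem.List.enumerate_nil]; rfl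
    | cons x rest =>
        have ho1 : o = 1 := by simp only [List.length_cons] at hmid; omega
        have hrest : rest = [] := by
          have : rest.length = 0 := by simp only [List.length_cons] at hmid; omega
          exact List.length_eq_zero_iff.mp this
        subst hrest
        rw [PySem.List.enumerate_cons, PySem.List.enumerate_nil, List.foldl_cons, List.foldl_nil]
        have h1 : ¬ ((0 + (t.length : Int), x).1 < (h : Int)) := by
          simp only [ht]; omega
        have h2 : ¬ ((h : Int) + (o : Int) ≤ (0 + (t.length : Int), x).1) := by
          simp only [ht, ho1]; push_cast; omega
        rw [pvStepB, if_neg h1, if_neg h2]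
  rw [hmidfold,
      pvPhase3 (h : Int) (o : Int) (by positivity) u t (0 + (t.length : Int) + (mid.length : Int))
        [] c (by rw [ht, hu]) (by rw [ht, hmid]; omega)]

theorem pvRowB (l : List Char) (c : Int) :
    ((PySem.List.enumerate l 0).foldl
      (pvStepB (PySem.Int.floordiv (l.length : Int) 2) (PySem.Int.mod (l.length : Int) 2))
      ([], c)).2 = c + pvPairCnt l := by
  have hfd : PySem.Int.floordiv (l.length : Int) 2 = ((l.length / 2 : Nat) : Int) := by
    exact_mod_cast PySem.Int.floordiv_natCast l.length 2
  have hmd : PySem.Int.mod (l.length : Int) 2 = ((l.length % 2 : Nat) : Int) := by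
    exact_mod_cast PySem.Int.mod_natCast l.length 2
  rw [hfd, hmd]
  have hh : l.length / 2 ≤ l.length := Nat.div_le_self _ _
  have hol : l.length % 2 ≤ l.length - l.length / 2 := by omega
  have hdecomp : l = l.take (l.length / 2) ++
      (((l.drop (l.length / 2)).take (l.length % 2)) ++ ((l.drop (l.length / 2)).drop (l.length % 2))) := by
    rw [List.take_append_drop, List.take_append_drop]
  have hcore := pvRowB_core (l.length / 2) (l.length % 2)
        (l.take (l.length / 2)) ((l.drop (l.length / 2)).take (l.length % 2))
        ((l.drop (l.length / 2)).drop (l.length % 2))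
        (by simp [List.length_take]; omega)
        (by simp [List.length_take, List.length_drop]; omega)
        (by simp [List.length_drop]; omega)
        (by omega) c
  rw [← hdecomp] at hcore
  rw [hcore]
  unfold pvPairCnt
  rw [List.drop_drop]

-- ===== VERDICT (by name: the statement is the Claim_ definition above) =====
theorem scariestMask_spec : Claim_equal_scariestMask := by
  intro mask h
  clear h
  unfold Spec_scariestMask scariestMask scariestMask_alt
  have hfun : (fun (count : Int) (s : String) => pvLoopA s.toList 0 ((s.toList.length : Int) - 1) count)
      = (fun (count : Int) (s : String) =>
          ((PySem.List.enumerate s.toList 0).foldl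
            (pvStepB (PySem.Int.floordiv (s.toList.length : Int) 2)
                     (PySem.Int.mod (s.toList.length : Int) 2)) ([], count)).2) := by
    funext c s
    rw [pvLoopA_acc, pvRowA, pvRowB]
  rw [hfun]
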